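-- pv_equiv track=rewrite | github.com/tikeda123/openclaw_relay | src/openclaw_relay/app.py | _json_safe_worker_attempt_counts
-- ===== SOURCE A (Python) =====
-- def _json_safe_worker_attempt_counts(
--     worker_attempt_counts: object,
-- ) -> dict[str, dict[str, dict[str, int]]]:
--     if not isinstance(worker_attempt_counts, dict):
--         return {}
--     result: dict[str, dict[str, dict[str, int]]] = {}
--     for worker_name, target_counts in worker_attempt_counts.items():
--         if not isinstance(worker_name, str) or not isinstance(target_counts, dict):
--             continue
--         result[worker_name] = {}
--         for target, result_counts in target_counts.items():
--             if not isinstance(target, str) or not isinstance(result_counts, dict):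
--                 continue
--             result[worker_name][target] = {}
--             for outcome, count in result_counts.items():
--                 if not isinstance(outcome, str):
--                     continue
--                 result[worker_name][target][outcome] = int(count)
--     return result
-- ===== SOURCE B (Python) =====
-- def _convert(node, depth):
--     if not isinstance(node, dict):
--         return {}
--     out = {}
--     for key, value in node.items():
--         if not isinstance(key, str):
--             continue
--         if depth == 0:
--             out[key] = int(value)
--         elif isinstance(value, dict):
--             out[key] = _convert(value, depth - 1)
--     return out
--
--
-- def _json_safe_worker_attempt_counts(
--     worker_attempt_counts: object,
-- ) -> dict[str, dict[str, dict[str, int]]]: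
--     if not isinstance(worker_attempt_counts, dict):
--         return {}
--     return _convert(worker_attempt_counts, 2)
-- ===== Notes on version B (the rewrite author's own statement) =====
-- stated objective: alternative
-- what changed: A's three hand-written nested loops are replaced by a single recursive helper _convert(node, depth) that handles every level uniformly (str-key filter, dict-value recursion for depth>0, int() leaf at depth 0), called once at depth 2.
import Mathlib
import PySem

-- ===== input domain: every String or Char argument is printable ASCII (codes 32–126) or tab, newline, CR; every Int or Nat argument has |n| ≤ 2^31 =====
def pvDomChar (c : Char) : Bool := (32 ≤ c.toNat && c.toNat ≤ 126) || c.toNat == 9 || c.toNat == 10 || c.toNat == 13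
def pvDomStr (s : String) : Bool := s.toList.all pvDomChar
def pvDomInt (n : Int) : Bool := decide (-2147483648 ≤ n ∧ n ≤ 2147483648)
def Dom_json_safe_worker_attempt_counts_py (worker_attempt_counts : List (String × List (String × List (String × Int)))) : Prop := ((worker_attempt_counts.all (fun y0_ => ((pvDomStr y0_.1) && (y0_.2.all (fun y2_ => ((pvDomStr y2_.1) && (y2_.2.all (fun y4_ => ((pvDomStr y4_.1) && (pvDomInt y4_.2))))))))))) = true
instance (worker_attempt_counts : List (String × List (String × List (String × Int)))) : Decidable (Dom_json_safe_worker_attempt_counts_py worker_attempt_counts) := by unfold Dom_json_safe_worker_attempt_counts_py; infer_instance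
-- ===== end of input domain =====

-- B replaces A's three literal nested loops by one recursive helper _convert(node, depth)
-- applied at depth 2 — a different decomposition of the same conversion (objective: alternative).

-- ===== PORT A =====
-- A builds the nested result dict with eager `result[...] = {}` assignments followed by
-- in-place filling; each mutation is a Dict.insert (overwrite keeps position), and the final
-- value of a nested dict is the items list inserted at the end of its iteration.
-- On this typed domain every isinstance check of A is true and int(count) is the identity.
def json_safe_worker_attempt_counts_py (worker_attempt_counts : List (String × List (String × List (String × Int)))) : List (String × List (String × List (String × Int))) :=
  (worker_attempt_counts.foldl
    (fun result p =>
      -- result[worker_name] = {}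
      let result := result.insert p.1 ([] : List (String × List (String × Int)))
      let inner := p.2.foldl
        (fun inn q =>
          -- result[worker_name][target] = {}
          let inn := inn.insert q.1 ([] : List (String × Int))
          let leaf := q.2.foldl
            (fun lf r => lf.insert r.1 r.2)  -- result[wn][t][outcome] = int(count)
            (PySem.Dict.empty : PySem.Dict String Int)
          inn.insert q.1 leaf.items)
        (PySem.Dict.empty : PySem.Dict String (List (String × Int)))
      result.insert p.1 inner.items)
    (PySem.Dict.empty : PySem.Dict String (List (String × List (String × Int))))).items

-- ===== PORT B =====
-- B is one recursive helper _convert(node, depth); in Lean the value type changes with the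
-- depth, so the recursion is expressed by passing the next-level converter as the argument f
-- (f = identity at depth 0, mirroring int(value) on an int).
def pvConvert {α β : Type} (f : α → β) (node : List (String × α)) : List (String × β) :=
  (node.foldl (fun out p => out.insert p.1 (f p.2))
    (PySem.Dict.empty : PySem.Dict String β)).items

def json_safe_worker_attempt_counts_py_alt (worker_attempt_counts : List (String × List (String × List (String × Int)))) : List (String × List (String × List (String × Int))) :=
  pvConvert (pvConvert (pvConvert (fun (c : Int) => c))) worker_attempt_counts

-- ===== PRECONDITION & SPEC =====
def Spec_json_safe_worker_attempt_counts_py (worker_attempt_counts : List (String × List (String × List (String × Int)))) (out : List (String × List (String × List (String × Int)))) : Prop := out = json_safe_worker_attempt_counts_py_alt worker_attempt_counts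
instance (worker_attempt_counts : List (String × List (String × List (String × Int)))) (out : List (String × List (String × List (String × Int)))) : Decidable (Spec_json_safe_worker_attempt_counts_py worker_attempt_counts out) := by unfold Spec_json_safe_worker_attempt_counts_py; infer_instance

-- ===== CLAIM (what is proved, stated in full; the proofs are below) =====
def Claim_equal_json_safe_worker_attempt_counts_py : Prop := ∀ (worker_attempt_counts : List (String × List (String × List (String × Int)))), Dom_json_safe_worker_attempt_counts_py worker_attempt_counts → Spec_json_safe_worker_attempt_counts_py worker_attempt_counts (json_safe_worker_attempt_counts_py worker_attempt_counts)

-- ===== LEMMAS AND PROOFS =====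

-- A's `result[k] = {}` followed by filling and re-inserting collapses to one insert.
theorem pv_fold_double_insert {β : Type} (b0 : β) (g : String × β → β) :
    ∀ (l : List (String × β)) (d : PySem.Dict String β),
      l.foldl (fun d p => (d.insert p.1 b0).insert p.1 (g p)) d
        = l.foldl (fun d p => d.insert p.1 (g p)) d := by
  intro l
  induction l with
  | nil => intro d; rfl
  | cons p t ih =>
      intro d
      rw [List.foldl_cons, List.foldl_cons, PySem.Dict.insert_insert_self]
      exact ih _

-- ===== VERDICT (by name: the statement is the Claim_ definition above) =====
theorem json_safe_worker_attempt_counts_py_spec : Claim_equal_json_safe_worker_attempt_counts_py := by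
  intro w _
  unfold Spec_json_safe_worker_attempt_counts_py
  unfold json_safe_worker_attempt_counts_py json_safe_worker_attempt_counts_py_alt pvConvert
  simp only [pv_fold_double_insert]
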